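-- pv_equiv track=rewrite | github.com/promptneurons/KitsapSearchEngine | scripts/analyze-vault.py | analyze_cec
-- ===== SOURCE A (Python) =====
-- from collections import defaultdict, Counter
--
-- def analyze_cec(entries):
--     counts = Counter()
--     labels = {}
--     for e in entries:
--         cec = e.get('cec')
--         if cec:
--             counts[cec] += 1
--             labels.setdefault(cec, e.get('cec_label',''))
--     return counts, labels
-- ===== SOURCE B (Python) =====
-- from collections import Counter
--
-- def analyze_cec(entries):
--     pairs = [(e['cec'], e.get('cec_label', '')) for e in entries if e.get('cec')]
--     counts = Counter(k for k, _ in pairs)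
--     labels = {k: next(l for kk, l in pairs if kk == k) for k in counts}
--     return counts, labels
-- ===== Notes on version B (the rewrite author's own statement) =====
-- stated objective: alternative
-- what changed: B first flattens the entries into a list of (cec, cec_label) pairs, lets the library Counter count the key list, and then builds the labels by searching that pair list for the first occurrence of each counted key, instead of incrementally updating two dicts entry by entry.
import Mathlib
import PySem

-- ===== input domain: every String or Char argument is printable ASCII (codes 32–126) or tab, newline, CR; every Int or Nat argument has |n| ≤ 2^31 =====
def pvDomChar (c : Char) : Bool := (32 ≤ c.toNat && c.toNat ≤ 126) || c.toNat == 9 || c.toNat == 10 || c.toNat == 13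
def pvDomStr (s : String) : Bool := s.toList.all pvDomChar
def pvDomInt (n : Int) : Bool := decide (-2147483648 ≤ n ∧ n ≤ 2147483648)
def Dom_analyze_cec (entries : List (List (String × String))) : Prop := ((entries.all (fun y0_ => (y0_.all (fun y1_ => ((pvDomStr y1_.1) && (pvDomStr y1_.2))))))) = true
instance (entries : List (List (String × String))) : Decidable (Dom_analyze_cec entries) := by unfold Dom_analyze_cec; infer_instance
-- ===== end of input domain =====

-- B flattens the entries into a (cec, cec_label) pair list, counts the key list with the
-- library Counter, and derives each label by a first-occurrence search of the pair list;
-- alternative decomposition (staged passes), no speed claim.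

-- e.get(k) on a Python dict (entries are dicts; assoc-list convention, first match)
def pvGet (e : List (String × String)) (k : String) : Option String :=
  (PySem.Dict.mk e).get? k

-- ===== PORT A =====
def analyze_cec (entries : List (List (String × String))) : (List (String × Int)) × (List (String × String)) :=
  let st := entries.foldl
    (fun (st : PySem.Dict String Int × PySem.Dict String String) e =>
      let cec := (pvGet e "cec").getD ""     -- cec = e.get('cec')  (None and '' are both falsy below)
      if cec ≠ "" then                       -- if cec:
        (st.1.modify cec 0 (· + 1),          -- counts[cec] += 1
         st.2.setdefault cec ((pvGet e "cec_label").getD ""))  -- labels.setdefault(cec, e.get('cec_label',''))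
      else st)
    (PySem.Dict.empty, PySem.Dict.empty)
  (st.1.items, st.2.items)

-- ===== PORT B =====
def analyze_cec_alt (entries : List (List (String × String))) : (List (String × Int)) × (List (String × String)) :=
  -- pairs = [(e['cec'], e.get('cec_label','')) for e in entries if e.get('cec')]
  let pairs := (entries.filter (fun e => (pvGet e "cec").getD "" != "")).map
      (fun e => ((pvGet e "cec").getD "", (pvGet e "cec_label").getD ""))
  -- counts = Counter(k for k, _ in pairs)
  let counts := PySem.Dict.counter (pairs.map Prod.fst)
  -- labels = {k: next(l for kk, l in pairs if kk == k) for k in counts}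
  -- (next(...) cannot raise: every key of counts occurs in pairs; getD "" is unreachable)
  (counts.items,
   counts.items.map (fun p =>
     (p.1, ((pairs.find? (fun q => q.1 == p.1)).map Prod.snd).getD "")))

-- ===== PRECONDITION & SPEC =====
def Spec_analyze_cec (entries : List (List (String × String))) (out : (List (String × Int)) × (List (String × String))) : Prop := out = analyze_cec_alt entries
instance (entries : List (List (String × String))) (out : (List (String × Int)) × (List (String × String))) : Decidable (Spec_analyze_cec entries out) := by unfold Spec_analyze_cec; infer_instance

-- ===== CLAIM =====
def Claim_equal_analyze_cec : Prop := ∀ (entries : List (List (String × String))), Dom_analyze_cec entries → Spec_analyze_cec entries (analyze_cec entries)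

-- ===== LEMMAS AND PROOFS =====

-- the flattened pair list B builds
def pairsOf (entries : List (List (String × String))) : List (String × String) :=
  (entries.filter (fun e => (pvGet e "cec").getD "" != "")).map
    (fun e => ((pvGet e "cec").getD "", (pvGet e "cec_label").getD ""))

-- A's step, restated on the flattened pairs
def stepP (st : PySem.Dict String Int × PySem.Dict String String) (p : String × String) :
    PySem.Dict String Int × PySem.Dict String String :=
  (st.1.modify p.1 0 (· + 1), st.2.setdefault p.1 p.2)

-- first label found for key k in the pair list
def lfun (ps : List (String × String)) (k : String) : String :=
  ((ps.find? (fun q => q.1 == k)).map Prod.snd).getD ""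

-- keys of the list not in seen, first occurrences, in order
def news (seen : List String) : List String → List String
  | [] => []
  | k :: t => if seen.contains k then news seen t else k :: news (seen ++ [k]) t

-- pairs whose key is not in seen, first occurrence per key, in order
def rest (seen : List String) : List (String × String) → List (String × String)
  | [] => []
  | p :: t => if seen.contains p.1 then rest seen t else p :: rest (seen ++ [p.1]) t

lemma L0 (l : List (List (String × String))) (st : PySem.Dict String Int × PySem.Dict String String) :
    l.foldl
      (fun st e =>
        let cec := (pvGet e "cec").getD ""
        if cec ≠ "" then
          (st.1.modify cec 0 (· + 1), st.2.setdefault cec ((pvGet e "cec_label").getD ""))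
        else st) st
    = (pairsOf l).foldl stepP st := by
  induction l generalizing st with
  | nil => rfl
  | cons e t ih =>
    by_cases h : (pvGet e "cec").getD "" ≠ ""
    · simp only [List.foldl_cons, pairsOf, List.filter_cons, h,
        bne_iff_ne, ne_eq, not_false_eq_true, if_true, List.map_cons]
      rw [ih]
      rfl
    · simp only [List.foldl_cons, pairsOf, List.filter_cons, h,
        bne_iff_ne, ne_eq, if_false]
      exact ih st

lemma L1 (ps : List (String × String)) (c : PySem.Dict String Int) (d : PySem.Dict String String) :
    ps.foldl stepP (c, d)
    = (ps.foldl (fun c p => c.modify p.1 0 (· + 1)) c,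
       ps.foldl (fun d p => d.setdefault p.1 p.2) d) := by
  induction ps generalizing c d with
  | nil => rfl
  | cons p t ih => exact ih _ _

lemma mem_news (ks : List String) (seen : List String) (k : String)
    (h : k ∈ news seen ks) : ¬ k ∈ seen := by
  induction ks generalizing seen with
  | nil => simp [news] at h
  | cons a t ih =>
    simp only [news] at h
    by_cases ha : seen.contains a = true
    · rw [if_pos ha] at h; exact ih seen h
    · rw [if_neg ha] at h
      rcases List.mem_cons.mp h with rfl | h2
      · simpa using ha
      · have h3 := ih (seen ++ [a]) h2
        simp only [List.mem_append] at h3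
        exact fun hm => h3 (Or.inl hm)

lemma update_eq_news (ks : List String) (seen : List String) :
    PySem.Set.update seen ks = seen ++ news seen ks := by
  induction ks generalizing seen with
  | nil => simp [PySem.Set.update, news]
  | cons a t ih =>
    have hcc : PySem.Set.contains seen a = List.contains seen a := rfl
    by_cases h : seen.contains a = true
    · rw [show PySem.Set.update seen (a :: t) = PySem.Set.update (PySem.Set.add seen a) t from rfl,
        show PySem.Set.add seen a = seen from by unfold PySem.Set.add; rw [hcc, if_pos h],
        ih seen]
      simp only [news, if_pos h]
    · rw [show PySem.Set.update seen (a :: t) = PySem.Set.update (PySem.Set.add seen a) t from rfl,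
        show PySem.Set.add seen a = seen ++ [a] from by unfold PySem.Set.add; rw [hcc, if_neg h],
        ih (seen ++ [a])]
      simp only [news, if_neg h]
      rw [List.append_assoc]
      rfl

lemma ofList_eq_news (ks : List String) : PySem.Set.ofList ks = news [] ks := by
  have h := update_eq_news ks []
  rw [show PySem.Set.ofList ks = PySem.Set.update [] ks from rfl, h, List.nil_append]

lemma keys_contains (d : PySem.Dict String String) (k : String) :
    d.keys.contains k = d.contains k := by
  by_cases h : d.contains k = true
  · rw [h]
    simpa using (PySem.Dict.contains_iff_mem_keys d k).mp h
  · have hne : ¬ k ∈ d.keys := fun hm => h ((PySem.Dict.contains_iff_mem_keys d k).mpr hm)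
    have hf : d.contains k = false := by simpa using h
    rw [hf]
    exact Bool.eq_false_iff.mpr (fun hc => hne (by simpa using hc))

lemma fold_setdefault (ps : List (String × String)) (d : PySem.Dict String String)
    (hn : d.keys.Nodup) :
    (ps.foldl (fun d p => d.setdefault p.1 p.2) d).items = d.items ++ rest d.keys ps := by
  induction ps generalizing d with
  | nil => simp [rest]
  | cons p t ih =>
    simp only [List.foldl_cons, rest]
    by_cases h : d.contains p.1 = true
    · rw [if_pos (by rw [keys_contains]; exact h),
        PySem.Dict.setdefault_of_contains d p.2 h, ih d hn]
    · have hf : d.contains p.1 = false := by simpa using h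
      rw [if_neg (by rw [keys_contains, hf]; simp),
        PySem.Dict.setdefault_of_not_contains d p.2 hf,
        ih _ (PySem.Dict.nodup_keys_insert d p.1 p.2 hn),
        PySem.Dict.items_insert_of_not_contains d p.2 hf,
        PySem.Dict.keys_insert_of_not_contains d p.2 hf]
      simp

lemma rest_eq_news (ps : List (String × String)) (seen : List String) :
    rest seen ps = (news seen (ps.map Prod.fst)).map (fun k => (k, lfun ps k)) := by
  induction ps generalizing seen with
  | nil => simp [rest, news]
  | cons p t ih =>
    simp only [rest, List.map_cons, news]
    by_cases h : seen.contains p.1 = true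
    · rw [if_pos h, if_pos h, ih seen]
      apply List.map_congr_left
      intro k hk
      have hk2 := mem_news _ _ _ hk
      have hne : (p.1 == k) = false :=
        beq_eq_false_iff_ne.mpr (fun he => hk2 (he ▸ (by simpa using h)))
      simp [lfun, hne]
    · rw [if_neg h, if_neg h, ih (seen ++ [p.1]), List.map_cons]
      have htail : (news (seen ++ [p.1]) (t.map Prod.fst)).map (fun k => (k, lfun t k))
          = (news (seen ++ [p.1]) (t.map Prod.fst)).map (fun k => (k, lfun (p :: t) k)) := by
        apply List.map_congr_left
        intro k hk
        have hk2 := mem_news _ _ _ hk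
        simp only [List.mem_append, List.mem_cons, List.not_mem_nil] at hk2
        have hne : (p.1 == k) = false :=
          beq_eq_false_iff_ne.mpr (fun he => hk2 (Or.inr (Or.inl he.symm)))
        simp [lfun, hne]
      have hhead : (p.1, lfun (p :: t) p.1) = p := by
        simp [lfun]
      rw [htail, hhead]

-- ===== VERDICT =====
theorem analyze_cec_spec : Claim_equal_analyze_cec := by
  intro entries _
  unfold Spec_analyze_cec analyze_cec
  rw [L0 entries (PySem.Dict.empty, PySem.Dict.empty), L1]
  have hc : (pairsOf entries).foldl (fun c p => c.modify p.1 0 (· + 1)) PySem.Dict.empty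
      = PySem.Dict.counter ((pairsOf entries).map Prod.fst) := by
    rw [PySem.Dict.counter_eq_foldl, List.foldl_map]
  have hd : ((pairsOf entries).foldl (fun d p => d.setdefault p.1 p.2) PySem.Dict.empty).items
      = (PySem.Dict.counter ((pairsOf entries).map Prod.fst)).items.map
          (fun p => (p.1, lfun (pairsOf entries) p.1)) := by
    rw [fold_setdefault _ _ PySem.Dict.nodup_keys_empty,
        show (PySem.Dict.empty : PySem.Dict String String).items = [] from rfl,
        show (PySem.Dict.empty : PySem.Dict String String).keys = [] from rfl,
        List.nil_append, rest_eq_news, PySem.Dict.items_counter, List.map_map,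
        ofList_eq_news]
    simp [Function.comp_def]
  have halt : analyze_cec_alt entries
      = ((PySem.Dict.counter ((pairsOf entries).map Prod.fst)).items,
         (PySem.Dict.counter ((pairsOf entries).map Prod.fst)).items.map
           (fun p => (p.1, lfun (pairsOf entries) p.1))) := rfl
  rw [halt]
  simp only [Prod.mk.injEq]
  exact ⟨by rw [hc], hd⟩
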